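-- pv_equiv track=rewrite | github.com/tsnellgrove/dark_castle3 | interp.py | input_cleanup
-- ===== SOURCE A (Python) =====
-- articles_lst = ['a', 'an', 'the']
--
-- abbreviations_dict = {
-- 		'n' : 'north',
-- 		's' : 'south',
-- 		'e' : 'east',
-- 		'w' : 'west',
-- 		'i' : 'inventory',
-- 		'l' : 'look',
-- 		'get' : 'take',
-- 		'x' : 'examine',
-- 		'h' : 'help'
-- }
--
-- def input_cleanup(user_input):
-- 		# first, convert user input string into word list
-- 		lst = []
-- 		lst.append(user_input)
-- 		user_input_lst = lst[0].split()
-- 		# next, convert all words to lower case and substitute abbreviations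
-- 		n = 0
-- 		for word in user_input_lst:
-- 				word = word.lower()
-- 				if word in abbreviations_dict:
-- 						word = abbreviations_dict[word]
-- 				user_input_lst[n] = word
-- 				n += 1
-- 		# finally, strip out articles
-- 		for article in articles_lst:
-- 				user_input_lst = [word for word in user_input_lst if word != article]
-- 		return user_input_lst
-- ===== SOURCE B (Python) =====
-- abbreviations_dict = {
-- 		'n' : 'north',
-- 		's' : 'south',
-- 		'e' : 'east',
-- 		'w' : 'west',
-- 		'i' : 'inventory',
-- 		'l' : 'look',
-- 		'get' : 'take',
-- 		'x' : 'examine',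
-- 		'h' : 'help'
-- }
--
-- ARTICLES = {'a', 'an', 'the'}
--
-- def input_cleanup(user_input):
-- 		# one pass: lowercase, expand abbreviation, drop articles
-- 		return [sub
-- 				for word in user_input.split()
-- 				for sub in [abbreviations_dict.get(word.lower(), word.lower())]
-- 				if sub not in ARTICLES]
-- ===== Notes on version B (the rewrite author's own statement) =====
-- stated objective: simpler
-- what changed: Replaces the indexed in-place substitution loop plus three separate article-filter passes with a single one-pass comprehension that lowercases, expands via dict.get, and filters against an article set.
import Mathlib
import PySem

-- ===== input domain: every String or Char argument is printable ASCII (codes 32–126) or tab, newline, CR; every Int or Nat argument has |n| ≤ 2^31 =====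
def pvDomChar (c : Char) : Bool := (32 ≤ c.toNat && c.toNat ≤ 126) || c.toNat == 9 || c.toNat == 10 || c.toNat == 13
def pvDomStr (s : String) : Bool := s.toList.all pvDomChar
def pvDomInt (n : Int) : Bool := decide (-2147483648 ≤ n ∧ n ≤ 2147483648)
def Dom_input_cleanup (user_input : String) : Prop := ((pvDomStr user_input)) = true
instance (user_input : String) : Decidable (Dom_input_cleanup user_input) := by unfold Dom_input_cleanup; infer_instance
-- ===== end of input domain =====

-- B replaces A's in-place substitution loop and three article-filter passes by one single-pass
-- comprehension (filterMap); objective: simpler.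

-- ===== PORT A =====
def pvArticles : List String := ["a", "an", "the"]

def pvAbbrev : PySem.Dict String String :=
  PySem.Dict.ofList [("n", "north"), ("s", "south"), ("e", "east"), ("w", "west"),
   ("i", "inventory"), ("l", "look"), ("get", "take"), ("x", "examine"), ("h", "help")]

def input_cleanup (user_input : String) : List String :=
  let lst : List String := [user_input]
  let user_input_lst := PySem.Str.split₀ ((PySem.List.pyGet? lst 0).getD "")
  -- the for-loop writes each transformed word back at its own index: a map over the list
  let user_input_lst := user_input_lst.map (fun word =>
    let word := PySem.Str.lower word
    let word := if (PySem.Dict.get? pvAbbrev word).isSome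
                then (PySem.Dict.get? pvAbbrev word).getD word else word
    word)
  pvArticles.foldl (fun l article => l.filter (fun word => word ≠ article)) user_input_lst

-- ===== PORT B =====
def pvArticleSet : PySem.Set String := PySem.Set.ofList ["a", "an", "the"]

def input_cleanup_alt (user_input : String) : List String :=
  (PySem.Str.split₀ user_input).filterMap (fun word =>
    let sub := PySem.Dict.getD pvAbbrev (PySem.Str.lower word) (PySem.Str.lower word)
    if sub ∈ pvArticleSet then none else some sub)

-- ===== PRECONDITION & SPEC =====
def Spec_input_cleanup (user_input : String) (out : List String) : Prop := out = input_cleanup_alt user_input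
instance (user_input : String) (out : List String) : Decidable (Spec_input_cleanup user_input out) := by unfold Spec_input_cleanup; infer_instance

-- ===== CLAIM (what is proved, stated in full; the proofs are below) =====
def Claim_equal_input_cleanup : Prop := ∀ (user_input : String), Dom_input_cleanup user_input → Spec_input_cleanup user_input (input_cleanup user_input)

-- ===== LEMMAS AND PROOFS =====
-- A's per-word transformation is exactly dict.getD on the lowercased word
lemma pv_word (w : String) :
    (let word := PySem.Str.lower w
     let word := if (PySem.Dict.get? pvAbbrev word).isSome
                 then (PySem.Dict.get? pvAbbrev word).getD word else word
     word) = PySem.Dict.getD pvAbbrev (PySem.Str.lower w) (PySem.Str.lower w) := by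
  rw [PySem.Dict.getD_eq_get?_getD]
  cases h : PySem.Dict.get? pvAbbrev (PySem.Str.lower w) <;> simp [h]

-- map then filter equals the corresponding filterMap
lemma pv_map_filter (g : String → String) (p : String → Bool) (ws : List String) :
    (ws.filter (p ∘ g)).map g =
    ws.filterMap (fun w => if p (g w) then some (g w) else none) := by
  induction ws with
  | nil => rfl
  | cons w ws ih => by_cases h : p (g w) <;> simp [Function.comp, h, ih]

-- substitute-then-three-filter-passes equals the single-pass filterMap
lemma pv_fuse (g : String → String) (ws : List String) :
    pvArticles.foldl (fun l article => l.filter (fun word => word ≠ article)) (ws.map g) =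
    ws.filterMap (fun w => if g w ∈ pvArticleSet then none else some (g w)) := by
  have h3 : ∀ l : List String,
      pvArticles.foldl (fun l article => l.filter (fun word => word ≠ article)) l =
      ((l.filter (fun w => w ≠ "a")).filter (fun w => w ≠ "an")).filter (fun w => w ≠ "the") := by
    intro l; rfl
  have hset : pvArticleSet = ["a", "an", "the"] := by decide
  rw [h3, List.filter_filter, List.filter_filter, List.filter_map, pv_map_filter]
  apply List.filterMap_congr
  intro x _
  by_cases h : g x ∈ pvArticleSet
  · rw [hset] at h
    simp only [List.mem_cons, List.not_mem_nil, or_false] at h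
    rcases h with h | h | h <;> simp [h, hset]
  · rw [hset] at h
    simp only [List.mem_cons, List.not_mem_nil, or_false, not_or] at h
    simp [h.1, h.2.1, h.2.2, hset]

-- ===== VERDICT (by name: the statement is the Claim_ definition above) =====
theorem input_cleanup_spec : Claim_equal_input_cleanup := by
  intro s _
  show pvArticles.foldl (fun l article => l.filter (fun word => word ≠ article))
      ((PySem.Str.split₀ s).map (fun word =>
        let word := PySem.Str.lower word
        let word := if (PySem.Dict.get? pvAbbrev word).isSome
                    then (PySem.Dict.get? pvAbbrev word).getD word else word
        word)) =
    (PySem.Str.split₀ s).filterMap (fun w =>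
      if PySem.Dict.getD pvAbbrev (PySem.Str.lower w) (PySem.Str.lower w) ∈ pvArticleSet then none
      else some (PySem.Dict.getD pvAbbrev (PySem.Str.lower w) (PySem.Str.lower w)))
  rw [show (fun word =>
        let word := PySem.Str.lower word
        let word := if (PySem.Dict.get? pvAbbrev word).isSome
                    then (PySem.Dict.get? pvAbbrev word).getD word else word
        word) = fun w => PySem.Dict.getD pvAbbrev (PySem.Str.lower w) (PySem.Str.lower w)
      from funext pv_word]
  exact pv_fuse _ _
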